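-- pv_equiv track=rewrite | github.com/khyledhanani/holosoma | src/holosoma_retargeting/holosoma_retargeting/src/iamr_retargeter.py | _extract_lr_flags
-- ===== SOURCE A (Python) =====
-- def _extract_lr_flags(flags: dict[str, bool]) -> tuple[bool, bool]:
--     left = right = False
--     for k, v in flags.items():
--         lk = k.lower()
--         if lk.startswith("l") or "left" in lk:
--             left = bool(v)
--         if lk.startswith("r") or "right" in lk:
--             right = bool(v)
--     return left, right
-- ===== SOURCE B (Python) =====
-- def _extract_lr_flags(flags):
--     items = list(flags.items())
--     def pick(pred):
--         for k, v in reversed(items):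
--             if pred(k.lower()):
--                 return bool(v)
--         return False
--     left = pick(lambda lk: lk.startswith("l") or "left" in lk)
--     right = pick(lambda lk: lk.startswith("r") or "right" in lk)
--     return left, right
-- ===== Notes on version B (the rewrite author's own statement) =====
-- stated objective: alternative
-- what changed: Replaces the single forward accumulating pass that overwrites both flags with two independent reverse scans that each return the value of the first (i.e. last-in-order) matching key, short-circuiting.
import Mathlib
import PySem

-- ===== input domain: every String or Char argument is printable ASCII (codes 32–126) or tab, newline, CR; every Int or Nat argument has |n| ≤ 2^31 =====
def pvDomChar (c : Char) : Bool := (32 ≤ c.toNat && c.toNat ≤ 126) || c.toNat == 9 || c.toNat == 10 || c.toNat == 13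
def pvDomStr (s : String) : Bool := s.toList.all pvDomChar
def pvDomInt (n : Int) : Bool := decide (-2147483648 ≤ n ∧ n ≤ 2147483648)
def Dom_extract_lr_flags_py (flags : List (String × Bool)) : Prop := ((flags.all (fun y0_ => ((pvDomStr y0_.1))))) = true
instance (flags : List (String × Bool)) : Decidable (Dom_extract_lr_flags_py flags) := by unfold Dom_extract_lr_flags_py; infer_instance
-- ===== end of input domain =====

-- ===== PORT A =====
-- single forward pass; both flags updated in place, last matching key wins
def extract_lr_flags_py (flags : List (String × Bool)) : Bool × Bool :=
  flags.foldl
    (fun st kv =>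
      let lk := PySem.Str.lower kv.1
      let l := if PySem.Str.startswith lk "l" || PySem.Str.isIn "left" lk then kv.2 else st.1
      let r := if PySem.Str.startswith lk "r" || PySem.Str.isIn "right" lk then kv.2 else st.2
      (l, r))
    (false, false)

-- ===== PORT B =====
-- B: two independent reverse scans; each flag is the value at the first matching key
-- of the reversed items (return False when none matches)
def pvPredL (lk : String) : Bool :=
  PySem.Str.startswith lk "l" || PySem.Str.isIn "left" lk
def pvPredR (lk : String) : Bool :=
  PySem.Str.startswith lk "r" || PySem.Str.isIn "right" lk

def pvPick (pred : String → Bool) : List (String × Bool) → Bool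
  | [] => false
  | kv :: rest => if pred (PySem.Str.lower kv.1) then kv.2 else pvPick pred rest

def extract_lr_flags_py_alt (flags : List (String × Bool)) : Bool × Bool :=
  (pvPick pvPredL flags.reverse, pvPick pvPredR flags.reverse)

-- ===== PRECONDITION & SPEC =====
def Spec_extract_lr_flags_py (flags : List (String × Bool)) (out : Bool × Bool) : Prop := out = extract_lr_flags_py_alt flags
instance (flags : List (String × Bool)) (out : Bool × Bool) : Decidable (Spec_extract_lr_flags_py flags out) := by unfold Spec_extract_lr_flags_py; infer_instance

-- ===== CLAIM (what is proved, stated in full; the proofs are below) =====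
def Claim_equal_extract_lr_flags_py : Prop := ∀ (flags : List (String × Bool)), Dom_extract_lr_flags_py flags → Spec_extract_lr_flags_py flags (extract_lr_flags_py flags)

-- ===== LEMMAS AND PROOFS =====
-- pvPick with an explicit default, to track the accumulator through the fold
def pvPickD (pred : String → Bool) (d : Bool) : List (String × Bool) → Bool
  | [] => d
  | kv :: rest => if pred (PySem.Str.lower kv.1) then kv.2 else pvPickD pred d rest

theorem pvPickD_append (pred : String → Bool) (d : Bool) (ys : List (String × Bool))
    (a : String × Bool) :
    pvPickD pred d (ys ++ [a]) = pvPickD pred (if pred (PySem.Str.lower a.1) then a.2 else d) ys := by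
  induction ys with
  | nil => simp [pvPickD]
  | cons y t ih => simp [pvPickD, ih]

theorem pvPick_eq_pickD (pred : String → Bool) (xs : List (String × Bool)) :
    pvPick pred xs = pvPickD pred false xs := by
  induction xs with
  | nil => rfl
  | cons y t ih => simp [pvPick, pvPickD, ih]

theorem fold_eq_pickD (xs : List (String × Bool)) (st : Bool × Bool) :
    xs.foldl
      (fun st kv =>
        let lk := PySem.Str.lower kv.1
        let l := if PySem.Str.startswith lk "l" || PySem.Str.isIn "left" lk then kv.2 else st.1
        let r := if PySem.Str.startswith lk "r" || PySem.Str.isIn "right" lk then kv.2 else st.2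
        (l, r)) st
    = (pvPickD pvPredL st.1 xs.reverse, pvPickD pvPredR st.2 xs.reverse) := by
  induction xs generalizing st with
  | nil => simp [pvPickD]
  | cons a t ih =>
      simp only [List.foldl_cons, List.reverse_cons, ih]
      rw [pvPickD_append, pvPickD_append]
      rfl

-- ===== VERDICT (by name: the statement is the Claim_ definition above) =====
theorem extract_lr_flags_py_spec : Claim_equal_extract_lr_flags_py := by
  intro flags _
  show extract_lr_flags_py flags = extract_lr_flags_py_alt flags
  unfold extract_lr_flags_py extract_lr_flags_py_alt
  rw [fold_eq_pickD, pvPick_eq_pickD, pvPick_eq_pickD]
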